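-- pv_equiv track=rewrite | github.com/Sadaad-Khan/MES1_System | ros_can_bridge_native/utils/canopen_utils.py | parse_cob_id
-- ===== SOURCE A (Python) =====
-- from typing import Dict, Tuple
--
-- def parse_cob_id(cob_id: int) -> Tuple[int, int]:
--     """
--     Parse CANopen COB-ID into function code and node ID.
--
--     Args:
--         cob_id: COB-ID to parse
--
--     Returns:
--         Tuple of (function_code, node_id)
--     """
--     # Determine function code by finding the highest matching base
--     function_codes = [
--         0x700, 0x680, 0x600, 0x580, 0x500, 0x480,
--         0x400, 0x380, 0x300, 0x280, 0x200, 0x180,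
--         0x100, 0x080, 0x000
--     ]
--
--     for fc in function_codes:
--         if cob_id >= fc and cob_id < fc + 128:
--             return fc, cob_id - fc
--
--     return 0, 0
-- ===== SOURCE B (Python) =====
-- def parse_cob_id(cob_id):
--     """Closed-form version: each base is a multiple of 128, so the bracket
--     is determined by divmod(cob_id, 128)."""
--     if 0 <= cob_id < 0x780:
--         q, r = divmod(cob_id, 128)
--         return (q * 128, r)
--     return (0, 0)
-- ===== Notes on version B (the rewrite author's own statement) =====
-- stated objective: simpler
-- what changed: Replaced the function-code list and its linear scan with a closed-form divmod by the node-field width plus one range guard, computing the bracket base and offset directly.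
import Mathlib
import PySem

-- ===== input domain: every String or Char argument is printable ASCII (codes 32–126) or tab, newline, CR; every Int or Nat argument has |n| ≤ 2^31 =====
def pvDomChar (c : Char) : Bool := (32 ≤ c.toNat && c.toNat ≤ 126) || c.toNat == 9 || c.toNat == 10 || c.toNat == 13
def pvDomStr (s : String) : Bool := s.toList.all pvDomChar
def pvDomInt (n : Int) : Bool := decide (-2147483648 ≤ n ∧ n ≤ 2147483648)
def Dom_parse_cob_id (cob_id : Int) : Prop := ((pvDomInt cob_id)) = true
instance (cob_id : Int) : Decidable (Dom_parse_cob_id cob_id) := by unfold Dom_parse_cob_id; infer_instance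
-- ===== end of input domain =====

-- B replaces A's 15-element list scan by a closed-form divmod-by-128 with one range guard (objective: simpler).


-- ===== PORT A =====
-- the 'for fc in function_codes' loop with early return
def pcidLoop (cob_id : Int) : List Int → Int × Int
  | [] => (0, 0)
  | fc :: rest =>
      if cob_id ≥ fc ∧ cob_id < fc + 128 then (fc, cob_id - fc)
      else pcidLoop cob_id rest

-- function_codes is the literal list from A, inlined at the loop call
def parse_cob_id (cob_id : Int) : Int × Int :=
  pcidLoop cob_id
    [0x700, 0x680, 0x600, 0x580, 0x500, 0x480,
     0x400, 0x380, 0x300, 0x280, 0x200, 0x180,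
     0x100, 0x080, 0x000]

-- ===== PORT B =====
def parse_cob_id_alt (cob_id : Int) : Int × Int :=
  if 0 ≤ cob_id ∧ cob_id < 0x780 then
    (PySem.Int.floordiv cob_id 128 * 128, PySem.Int.mod cob_id 128)
  else (0, 0)

-- ===== PRECONDITION & SPEC =====
def Spec_parse_cob_id (cob_id : Int) (out : Int × Int) : Prop := out = parse_cob_id_alt cob_id
instance (cob_id : Int) (out : Int × Int) : Decidable (Spec_parse_cob_id cob_id out) := by unfold Spec_parse_cob_id; infer_instance

-- ===== CLAIM (what is proved, stated in full; the proofs are below) =====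
def Claim_equal_parse_cob_id : Prop := ∀ (cob_id : Int), Dom_parse_cob_id cob_id → Spec_parse_cob_id cob_id (parse_cob_id cob_id)

-- ===== LEMMAS AND PROOFS =====
theorem pcidLoop_nil (c : Int) : pcidLoop c [] = (0, 0) := rfl

theorem pcidLoop_cons (c fc : Int) (rest : List Int) :
    pcidLoop c (fc :: rest) =
      if c ≥ fc ∧ c < fc + 128 then (fc, c - fc) else pcidLoop c rest := rfl

theorem pcid_miss (c : Int) (h : c < 0 ∨ 1920 ≤ c) :
    pcidLoop c ([1792, 1664, 1536, 1408, 1280, 1152, 1024, 896, 768, 640, 512, 384, 256, 128, 0] : List Int) = (0, 0) := by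
  rw [pcidLoop_cons, if_neg (by omega), pcidLoop_cons, if_neg (by omega), pcidLoop_cons, if_neg (by omega), pcidLoop_cons, if_neg (by omega), pcidLoop_cons, if_neg (by omega), pcidLoop_cons, if_neg (by omega), pcidLoop_cons, if_neg (by omega), pcidLoop_cons, if_neg (by omega), pcidLoop_cons, if_neg (by omega), pcidLoop_cons, if_neg (by omega), pcidLoop_cons, if_neg (by omega), pcidLoop_cons, if_neg (by omega), pcidLoop_cons, if_neg (by omega), pcidLoop_cons, if_neg (by omega), pcidLoop_cons, if_neg (by omega), pcidLoop_nil]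

theorem pcid_hit_14 (c : Int) (h : 1792 ≤ c ∧ c < 1920) :
    pcidLoop c ([1792, 1664, 1536, 1408, 1280, 1152, 1024, 896, 768, 640, 512, 384, 256, 128, 0] : List Int) = (1792, c - 1792) := by
  rw [pcidLoop_cons, if_pos (by omega)]

theorem pcid_hit_13 (c : Int) (h : 1664 ≤ c ∧ c < 1792) :
    pcidLoop c ([1792, 1664, 1536, 1408, 1280, 1152, 1024, 896, 768, 640, 512, 384, 256, 128, 0] : List Int) = (1664, c - 1664) := by
  rw [pcidLoop_cons, if_neg (by omega), pcidLoop_cons, if_pos (by omega)]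

theorem pcid_hit_12 (c : Int) (h : 1536 ≤ c ∧ c < 1664) :
    pcidLoop c ([1792, 1664, 1536, 1408, 1280, 1152, 1024, 896, 768, 640, 512, 384, 256, 128, 0] : List Int) = (1536, c - 1536) := by
  rw [pcidLoop_cons, if_neg (by omega), pcidLoop_cons, if_neg (by omega), pcidLoop_cons, if_pos (by omega)]

theorem pcid_hit_11 (c : Int) (h : 1408 ≤ c ∧ c < 1536) :
    pcidLoop c ([1792, 1664, 1536, 1408, 1280, 1152, 1024, 896, 768, 640, 512, 384, 256, 128, 0] : List Int) = (1408, c - 1408) := by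
  rw [pcidLoop_cons, if_neg (by omega), pcidLoop_cons, if_neg (by omega), pcidLoop_cons, if_neg (by omega), pcidLoop_cons, if_pos (by omega)]

theorem pcid_hit_10 (c : Int) (h : 1280 ≤ c ∧ c < 1408) :
    pcidLoop c ([1792, 1664, 1536, 1408, 1280, 1152, 1024, 896, 768, 640, 512, 384, 256, 128, 0] : List Int) = (1280, c - 1280) := by
  rw [pcidLoop_cons, if_neg (by omega), pcidLoop_cons, if_neg (by omega), pcidLoop_cons, if_neg (by omega), pcidLoop_cons, if_neg (by omega), pcidLoop_cons, if_pos (by omega)]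

theorem pcid_hit_9 (c : Int) (h : 1152 ≤ c ∧ c < 1280) :
    pcidLoop c ([1792, 1664, 1536, 1408, 1280, 1152, 1024, 896, 768, 640, 512, 384, 256, 128, 0] : List Int) = (1152, c - 1152) := by
  rw [pcidLoop_cons, if_neg (by omega), pcidLoop_cons, if_neg (by omega), pcidLoop_cons, if_neg (by omega), pcidLoop_cons, if_neg (by omega), pcidLoop_cons, if_neg (by omega), pcidLoop_cons, if_pos (by omega)]

theorem pcid_hit_8 (c : Int) (h : 1024 ≤ c ∧ c < 1152) :
    pcidLoop c ([1792, 1664, 1536, 1408, 1280, 1152, 1024, 896, 768, 640, 512, 384, 256, 128, 0] : List Int) = (1024, c - 1024) := by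
  rw [pcidLoop_cons, if_neg (by omega), pcidLoop_cons, if_neg (by omega), pcidLoop_cons, if_neg (by omega), pcidLoop_cons, if_neg (by omega), pcidLoop_cons, if_neg (by omega), pcidLoop_cons, if_neg (by omega), pcidLoop_cons, if_pos (by omega)]

theorem pcid_hit_7 (c : Int) (h : 896 ≤ c ∧ c < 1024) :
    pcidLoop c ([1792, 1664, 1536, 1408, 1280, 1152, 1024, 896, 768, 640, 512, 384, 256, 128, 0] : List Int) = (896, c - 896) := by
  rw [pcidLoop_cons, if_neg (by omega), pcidLoop_cons, if_neg (by omega), pcidLoop_cons, if_neg (by omega), pcidLoop_cons, if_neg (by omega), pcidLoop_cons, if_neg (by omega), pcidLoop_cons, if_neg (by omega), pcidLoop_cons, if_neg (by omega), pcidLoop_cons, if_pos (by omega)]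

theorem pcid_hit_6 (c : Int) (h : 768 ≤ c ∧ c < 896) :
    pcidLoop c ([1792, 1664, 1536, 1408, 1280, 1152, 1024, 896, 768, 640, 512, 384, 256, 128, 0] : List Int) = (768, c - 768) := by
  rw [pcidLoop_cons, if_neg (by omega), pcidLoop_cons, if_neg (by omega), pcidLoop_cons, if_neg (by omega), pcidLoop_cons, if_neg (by omega), pcidLoop_cons, if_neg (by omega), pcidLoop_cons, if_neg (by omega), pcidLoop_cons, if_neg (by omega), pcidLoop_cons, if_neg (by omega), pcidLoop_cons, if_pos (by omega)]

theorem pcid_hit_5 (c : Int) (h : 640 ≤ c ∧ c < 768) :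
    pcidLoop c ([1792, 1664, 1536, 1408, 1280, 1152, 1024, 896, 768, 640, 512, 384, 256, 128, 0] : List Int) = (640, c - 640) := by
  rw [pcidLoop_cons, if_neg (by omega), pcidLoop_cons, if_neg (by omega), pcidLoop_cons, if_neg (by omega), pcidLoop_cons, if_neg (by omega), pcidLoop_cons, if_neg (by omega), pcidLoop_cons, if_neg (by omega), pcidLoop_cons, if_neg (by omega), pcidLoop_cons, if_neg (by omega), pcidLoop_cons, if_neg (by omega), pcidLoop_cons, if_pos (by omega)]

theorem pcid_hit_4 (c : Int) (h : 512 ≤ c ∧ c < 640) :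
    pcidLoop c ([1792, 1664, 1536, 1408, 1280, 1152, 1024, 896, 768, 640, 512, 384, 256, 128, 0] : List Int) = (512, c - 512) := by
  rw [pcidLoop_cons, if_neg (by omega), pcidLoop_cons, if_neg (by omega), pcidLoop_cons, if_neg (by omega), pcidLoop_cons, if_neg (by omega), pcidLoop_cons, if_neg (by omega), pcidLoop_cons, if_neg (by omega), pcidLoop_cons, if_neg (by omega), pcidLoop_cons, if_neg (by omega), pcidLoop_cons, if_neg (by omega), pcidLoop_cons, if_neg (by omega), pcidLoop_cons, if_pos (by omega)]

theorem pcid_hit_3 (c : Int) (h : 384 ≤ c ∧ c < 512) :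
    pcidLoop c ([1792, 1664, 1536, 1408, 1280, 1152, 1024, 896, 768, 640, 512, 384, 256, 128, 0] : List Int) = (384, c - 384) := by
  rw [pcidLoop_cons, if_neg (by omega), pcidLoop_cons, if_neg (by omega), pcidLoop_cons, if_neg (by omega), pcidLoop_cons, if_neg (by omega), pcidLoop_cons, if_neg (by omega), pcidLoop_cons, if_neg (by omega), pcidLoop_cons, if_neg (by omega), pcidLoop_cons, if_neg (by omega), pcidLoop_cons, if_neg (by omega), pcidLoop_cons, if_neg (by omega), pcidLoop_cons, if_neg (by omega), pcidLoop_cons, if_pos (by omega)]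

theorem pcid_hit_2 (c : Int) (h : 256 ≤ c ∧ c < 384) :
    pcidLoop c ([1792, 1664, 1536, 1408, 1280, 1152, 1024, 896, 768, 640, 512, 384, 256, 128, 0] : List Int) = (256, c - 256) := by
  rw [pcidLoop_cons, if_neg (by omega), pcidLoop_cons, if_neg (by omega), pcidLoop_cons, if_neg (by omega), pcidLoop_cons, if_neg (by omega), pcidLoop_cons, if_neg (by omega), pcidLoop_cons, if_neg (by omega), pcidLoop_cons, if_neg (by omega), pcidLoop_cons, if_neg (by omega), pcidLoop_cons, if_neg (by omega), pcidLoop_cons, if_neg (by omega), pcidLoop_cons, if_neg (by omega), pcidLoop_cons, if_neg (by omega), pcidLoop_cons, if_pos (by omega)]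

theorem pcid_hit_1 (c : Int) (h : 128 ≤ c ∧ c < 256) :
    pcidLoop c ([1792, 1664, 1536, 1408, 1280, 1152, 1024, 896, 768, 640, 512, 384, 256, 128, 0] : List Int) = (128, c - 128) := by
  rw [pcidLoop_cons, if_neg (by omega), pcidLoop_cons, if_neg (by omega), pcidLoop_cons, if_neg (by omega), pcidLoop_cons, if_neg (by omega), pcidLoop_cons, if_neg (by omega), pcidLoop_cons, if_neg (by omega), pcidLoop_cons, if_neg (by omega), pcidLoop_cons, if_neg (by omega), pcidLoop_cons, if_neg (by omega), pcidLoop_cons, if_neg (by omega), pcidLoop_cons, if_neg (by omega), pcidLoop_cons, if_neg (by omega), pcidLoop_cons, if_neg (by omega), pcidLoop_cons, if_pos (by omega)]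

theorem pcid_hit_0 (c : Int) (h : 0 ≤ c ∧ c < 128) :
    pcidLoop c ([1792, 1664, 1536, 1408, 1280, 1152, 1024, 896, 768, 640, 512, 384, 256, 128, 0] : List Int) = (0, c - 0) := by
  rw [pcidLoop_cons, if_neg (by omega), pcidLoop_cons, if_neg (by omega), pcidLoop_cons, if_neg (by omega), pcidLoop_cons, if_neg (by omega), pcidLoop_cons, if_neg (by omega), pcidLoop_cons, if_neg (by omega), pcidLoop_cons, if_neg (by omega), pcidLoop_cons, if_neg (by omega), pcidLoop_cons, if_neg (by omega), pcidLoop_cons, if_neg (by omega), pcidLoop_cons, if_neg (by omega), pcidLoop_cons, if_neg (by omega), pcidLoop_cons, if_neg (by omega), pcidLoop_cons, if_neg (by omega), pcidLoop_cons, if_pos (by omega)]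

theorem pcid_eq (c : Int) : parse_cob_id c = parse_cob_id_alt c := by
  have hd : PySem.Int.floordiv c 128 = c / 128 := PySem.Int.floordiv_eq_ediv_of_pos (by omega)
  have hm : PySem.Int.mod c 128 = c % 128 := PySem.Int.mod_eq_emod_of_pos (by omega)
  unfold parse_cob_id parse_cob_id_alt
  rw [hd, hm]
  by_cases h : 0 ≤ c ∧ c < 1920
  case neg => rw [if_neg h, pcid_miss c (by omega)]
  case pos =>
    rw [if_pos h]
    by_cases h14 : 1792 ≤ c
    · rw [pcid_hit_14 c ⟨h14, by omega⟩]; exact congrArg₂ Prod.mk (by omega) (by omega)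
    by_cases h13 : 1664 ≤ c
    · rw [pcid_hit_13 c ⟨h13, by omega⟩]; exact congrArg₂ Prod.mk (by omega) (by omega)
    by_cases h12 : 1536 ≤ c
    · rw [pcid_hit_12 c ⟨h12, by omega⟩]; exact congrArg₂ Prod.mk (by omega) (by omega)
    by_cases h11 : 1408 ≤ c
    · rw [pcid_hit_11 c ⟨h11, by omega⟩]; exact congrArg₂ Prod.mk (by omega) (by omega)
    by_cases h10 : 1280 ≤ c
    · rw [pcid_hit_10 c ⟨h10, by omega⟩]; exact congrArg₂ Prod.mk (by omega) (by omega)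
    by_cases h9 : 1152 ≤ c
    · rw [pcid_hit_9 c ⟨h9, by omega⟩]; exact congrArg₂ Prod.mk (by omega) (by omega)
    by_cases h8 : 1024 ≤ c
    · rw [pcid_hit_8 c ⟨h8, by omega⟩]; exact congrArg₂ Prod.mk (by omega) (by omega)
    by_cases h7 : 896 ≤ c
    · rw [pcid_hit_7 c ⟨h7, by omega⟩]; exact congrArg₂ Prod.mk (by omega) (by omega)
    by_cases h6 : 768 ≤ c
    · rw [pcid_hit_6 c ⟨h6, by omega⟩]; exact congrArg₂ Prod.mk (by omega) (by omega)
    by_cases h5 : 640 ≤ c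
    · rw [pcid_hit_5 c ⟨h5, by omega⟩]; exact congrArg₂ Prod.mk (by omega) (by omega)
    by_cases h4 : 512 ≤ c
    · rw [pcid_hit_4 c ⟨h4, by omega⟩]; exact congrArg₂ Prod.mk (by omega) (by omega)
    by_cases h3 : 384 ≤ c
    · rw [pcid_hit_3 c ⟨h3, by omega⟩]; exact congrArg₂ Prod.mk (by omega) (by omega)
    by_cases h2 : 256 ≤ c
    · rw [pcid_hit_2 c ⟨h2, by omega⟩]; exact congrArg₂ Prod.mk (by omega) (by omega)
    by_cases h1 : 128 ≤ c
    · rw [pcid_hit_1 c ⟨h1, by omega⟩]; exact congrArg₂ Prod.mk (by omega) (by omega)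
    rw [pcid_hit_0 c ⟨by omega, by omega⟩]; exact congrArg₂ Prod.mk (by omega) (by omega)


-- ===== VERDICT (by name: the statement is the Claim_ definition above) =====
theorem parse_cob_id_spec : Claim_equal_parse_cob_id := by
  intro c _
  unfold Spec_parse_cob_id
  exact pcid_eq c
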